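-- pv_equiv track=rewrite | github.com/NeValetik/AA-labs | lab2aa/sorts.py | heapify_visual
-- ===== SOURCE A (Python) =====
-- def heapify_visual(arr, n, i):
--     largest = i
--     l = 2 * i + 1
--     r = 2 * i + 2
--
--     if l < n and arr[l] > arr[largest]:
--         largest = l
--
--     if r < n and arr[r] > arr[largest]:
--         largest = r
--
--     if largest != i:
--         arr[i], arr[largest] = arr[largest], arr[i]
--         yield arr.copy()
--         yield from heapify_visual(arr, n, largest)
-- ===== SOURCE B (Python) =====
-- def heapify_visual(arr, n, i):
--     # Two-phase sift-down: first compute the whole descent path by comparing the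
--     # (still untouched) children against the sifted value v, then replay the
--     # swaps along that path, yielding a copy after each. Mutates arr like A.
--     if 2 * i + 1 >= n:
--         return
--     v = arr[i]
--     path = []
--     j = i
--     while True:
--         l, r = 2 * j + 1, 2 * j + 2
--         best, bv = j, v
--         if l < n and arr[l] > bv:
--             best, bv = l, arr[l]
--         if r < n and arr[r] > bv:
--             best, bv = r, arr[r]
--         if best == j:
--             break
--         path.append(best)
--         j = best
--     for k in path:
--         arr[i], arr[k] = arr[k], arr[i]
--         yield arr.copy()
--         i = k
-- ===== Notes on version B (the rewrite author's own statement) =====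
-- stated objective: alternative
-- what changed: Replaces A's recursive swap-as-you-compare sift-down by a two-phase algorithm: first compute the whole descent path by comparing the untouched children against the sifted value, then replay the swaps along that path, yielding a copy after each.
-- outside the precondition, e.g. on heapify_visual([5, 3], 2, -1): A returns [[3, 5], [5, 3]], B returns [[3, 5]]; on heapify_visual([1, 2, 3, 4, 5], 7, 1): A returns [[1, 5, 3, 4, 2]], B returns [[1, 5, 3, 4, 2]]
import Mathlib
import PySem

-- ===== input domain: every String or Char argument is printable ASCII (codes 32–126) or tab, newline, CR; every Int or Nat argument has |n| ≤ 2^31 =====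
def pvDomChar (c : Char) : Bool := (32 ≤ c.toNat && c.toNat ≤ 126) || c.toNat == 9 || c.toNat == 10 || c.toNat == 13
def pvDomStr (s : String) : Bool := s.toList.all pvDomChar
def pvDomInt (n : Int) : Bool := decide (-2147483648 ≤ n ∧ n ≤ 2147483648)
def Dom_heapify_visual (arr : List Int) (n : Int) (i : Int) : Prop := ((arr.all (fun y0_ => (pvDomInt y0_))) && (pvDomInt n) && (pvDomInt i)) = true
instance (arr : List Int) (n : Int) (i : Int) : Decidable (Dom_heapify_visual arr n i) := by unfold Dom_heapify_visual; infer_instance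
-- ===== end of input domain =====

-- B replaces A's recursive swap-as-you-compare sift-down by a two-phase algorithm (compute the
-- descent path against the sifted value, then replay the swaps); objective: alternative, same cost.
-- Both Pythons mutate arr in place identically; the equivalence proved is about the yielded states.


-- ===== PORT A =====
-- 'if j < n and arr[j] > arr[best]: best = j'; none = IndexError
def hvCheckA (arr : List Int) (n j best : Int) : Option Int :=
  if j < n then
    match PySem.List.pyGet? arr j, PySem.List.pyGet? arr best with
    | some a, some b => some (if b < a then j else best)
    | _, _ => none
  else some best

-- recursive sift-down, as in A; fuel only makes the recursion structural (ample on every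
-- non-raising input); [] on the branches where the Python raises (outside Pre_)
def heapifyGoA : Nat → List Int → Int → Int → List (List Int)
  | 0, _, _, _ => []
  | fuel+1, arr, n, i =>
    match hvCheckA arr n (2*i+1) i with
    | none => []
    | some m =>
      match hvCheckA arr n (2*i+2) m with
      | none => []
      | some largest =>
        if largest = i then []
        else
          match PySem.List.pyGet? arr i, PySem.List.pyGet? arr largest with
          | some vi, some vl =>
            match PySem.List.pySet? arr i vl with
            | some arr1 =>
              match PySem.List.pySet? arr1 largest vi with
              | some arr2 => arr2 :: heapifyGoA fuel arr2 n largest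
              | none => []
            | none => []
          | _, _ => []

def heapify_visual (arr : List Int) (n : Int) (i : Int) : List (List Int) :=
  heapifyGoA (arr.length + n.natAbs + i.natAbs + 2) arr n i

-- ===== PORT B =====
-- 'if c < n and arr[c] > bv: best, bv = c, arr[c]' — candidate step of B's phase 1,
-- carrying the current best value bv instead of re-reading the array; none = IndexError
def hvCand (arr : List Int) (n b bv c : Int) : Option (Int × Int) :=
  if c < n then
    match PySem.List.pyGet? arr c with
    | some a => some (if bv < a then (c, a) else (b, bv))
    | none => none
  else some (b, bv)

-- B's phase 1: the descent path of the sifted value v, computed on the UNMUTATED array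
def hvPath : Nat → List Int → Int → Int → Int → Option (List Int)
  | 0, _, _, _, _ => some []
  | fuel+1, arr, n, v, j =>
    match hvCand arr n j v (2*j+1) with
    | none => none
    | some (b1, bv1) =>
      match hvCand arr n b1 bv1 (2*j+2) with
      | none => none
      | some (b2, _) =>
        if b2 = j then some []
        else (hvPath fuel arr n v b2).map (fun p => b2 :: p)

-- B's phase 2: replay the swaps along the path, recording each state
def hvStates : List Int → Int → List Int → List (List Int)
  | _, _, [] => []
  | arr, j, k :: ks =>
    match PySem.List.pyGet? arr j, PySem.List.pyGet? arr k with
    | some vj, some vk =>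
      match PySem.List.pySet? arr j vk with
      | some arr1 =>
        match PySem.List.pySet? arr1 k vj with
        | some arr2 => arr2 :: hvStates arr2 k ks
        | none => []
      | none => []
    | _, _ => []

def heapify_visual_alt (arr : List Int) (n : Int) (i : Int) : List (List Int) :=
  if n ≤ 2*i+1 then []
  else
    match PySem.List.pyGet? arr i with
    | none => []
    | some v =>
      match hvPath (arr.length + n.natAbs + i.natAbs + 2) arr n v i with
      | none => []
      | some p => hvStates arr i p

-- ===== PRECONDITION & SPEC =====
-- Pre_ excludes negative i, where A's values come from Python's negative-index wraparound — an
-- accident for a heap routine — and n > len(arr) except when no child index lies below n (there the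
-- sift can raise IndexError; on some shapes it happens to return before reaching a bad index).
def Pre_heapify_visual (arr : List Int) (n : Int) (i : Int) : Prop :=
  0 ≤ i ∧ (n ≤ (arr.length : Int) ∨ n ≤ 2 * i + 1)
instance (arr : List Int) (n : Int) (i : Int) : Decidable (Pre_heapify_visual arr n i) := by
  unfold Pre_heapify_visual; infer_instance

def pvWitness_heapify_visual : List Int × Int × Int := ([3, 1, 2], 3, 0)

def Spec_heapify_visual (arr : List Int) (n : Int) (i : Int) (out : List (List Int)) : Prop := out = heapify_visual_alt arr n i
instance (arr : List Int) (n : Int) (i : Int) (out : List (List Int)) : Decidable (Spec_heapify_visual arr n i out) := by unfold Spec_heapify_visual; infer_instance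

-- ===== CLAIM (what is proved, stated in full; the proofs are below) =====
def Claim_equal_heapify_visual : Prop := ∀ (arr : List Int) (n : Int) (i : Int), Dom_heapify_visual arr n i → Pre_heapify_visual arr n i → Spec_heapify_visual arr n i (heapify_visual arr n i)

-- ===== LEMMAS AND PROOFS =====
-- total forms of pyGet?/pySet? for a nonnegative in-range index
theorem hv_pyGet_some (xs : List Int) (c : Int) (h0 : 0 ≤ c) (h : c < (xs.length : Int)) :
    PySem.List.pyGet? xs c = some (xs[c.toNat]'(by omega)) :=
  PySem.List.pyGet?_eq_some_getElem xs h0 h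

theorem hv_pySet_some (xs : List Int) (c : Int) (v : Int) (h0 : 0 ≤ c) (h : c < (xs.length : Int)) :
    PySem.List.pySet? xs c v = some (xs.set c.toNat v) := by
  have h1 : c.toNat < xs.length := by omega
  have h2 : ((c.toNat : Nat) : Int) = c := by omega
  conv_lhs => rw [← h2]
  rw [PySem.List.pySet?_natCast xs c.toNat v h1]

-- candidate step: under in-range hypotheses hvCand and hvCheckA agree, and hvCand's
-- carried value is the array value at its carried index
theorem hv_cand_spec (arr : List Int) (n b bv c : Int)
    (hb : PySem.List.pyGet? arr b = some bv) (hc : 0 ≤ c) (hn : n ≤ (arr.length : Int)) :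
    ∃ b' bv', hvCand arr n b bv c = some (b', bv') ∧ hvCheckA arr n c b = some b' ∧
      PySem.List.pyGet? arr b' = some bv' ∧ (b' = b ∨ (b' = c ∧ c < n)) := by
  by_cases h : c < n
  · have hg := hv_pyGet_some arr c hc (by omega)
    by_cases hlt : bv < arr[c.toNat]'(by omega)
    · exact ⟨c, _, by simp [hvCand, h, hg, hlt], by simp [hvCheckA, h, hg, hb, hlt], hg, Or.inr ⟨rfl, h⟩⟩
    · exact ⟨b, bv, by simp [hvCand, h, hg, hlt], by simp [hvCheckA, h, hg, hb, hlt], hb, Or.inl rfl⟩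
  · exact ⟨b, bv, by simp [hvCand, h], by simp [hvCheckA, h], hb, Or.inl rfl⟩

-- the first component hvCand returns is either the old best or the candidate
theorem hv_cand_fst (arr : List Int) (n b bv c : Int) (b' bv' : Int)
    (h : hvCand arr n b bv c = some (b', bv')) : b' = b ∨ b' = c := by
  unfold hvCand at h
  by_cases hc : c < n
  · rw [if_pos hc] at h
    cases hg : PySem.List.pyGet? arr c <;> rw [hg] at h
    · simp at h
    · rename_i a
      dsimp only at h
      by_cases hlt : bv < a
      · rw [if_pos hlt] at h
        simp only [Option.some.injEq, Prod.mk.injEq] at h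
        exact Or.inr h.1.symm
      · rw [if_neg hlt] at h
        simp only [Option.some.injEq, Prod.mk.injEq] at h
        exact Or.inl h.1.symm
  · rw [if_neg hc] at h
    simp only [Option.some.injEq, Prod.mk.injEq] at h
    exact Or.inl h.1.symm

-- hvPath only inspects positions strictly above the cursor
theorem hv_path_congr (f : Nat) : ∀ (arr arr' : List Int) (n v j : Int), 0 ≤ j →
    (∀ c : Int, j < c → PySem.List.pyGet? arr c = PySem.List.pyGet? arr' c) →
    hvPath f arr n v j = hvPath f arr' n v j := by
  induction f with
  | zero => intro arr arr' n v j _ _; rfl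
  | succ f ih =>
    intro arr arr' n v j hj hag
    have e1 : hvCand arr' n j v (2*j+1) = hvCand arr n j v (2*j+1) := by
      simp [hvCand, hag (2*j+1) (by omega)]
    rw [hvPath, hvPath, e1]
    cases h1 : hvCand arr n j v (2*j+1) with
    | none => rfl
    | some p1 =>
      obtain ⟨b1, bv1⟩ := p1
      have e2 : hvCand arr' n b1 bv1 (2*j+2) = hvCand arr n b1 bv1 (2*j+2) := by
        simp [hvCand, hag (2*j+2) (by omega)]
      simp only [e2]
      cases h2 : hvCand arr n b1 bv1 (2*j+2) with
      | none => rfl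
      | some p2 =>
        obtain ⟨b2, bv2⟩ := p2
        by_cases hbj : b2 = j
        · simp [hbj]
        · have hb1 : b1 = j ∨ b1 = 2*j+1 := hv_cand_fst arr n j v (2*j+1) b1 bv1 h1
          have hb2 : b2 = b1 ∨ b2 = 2*j+2 := hv_cand_fst arr n b1 bv1 (2*j+2) b2 bv2 h2
          have hrec : hvPath f arr n v b2 = hvPath f arr' n v b2 :=
            ih arr arr' n v b2 (by omega) (fun c hc => hag c (by omega))
          simp [hbj, hrec]

-- main invariant: A's recursive sift-down from a cursor holding value v equals
-- B's path computation followed by B's swap replay, on the same current array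
theorem hv_main (f : Nat) : ∀ (arr : List Int) (n j v : Int), 0 ≤ j → n ≤ (arr.length : Int) →
    PySem.List.pyGet? arr j = some v →
    ∃ p, hvPath f arr n v j = some p ∧ heapifyGoA f arr n j = hvStates arr j p := by
  induction f with
  | zero => intro arr n j v _ _ _; exact ⟨[], rfl, rfl⟩
  | succ f ih =>
    intro arr n j v hj hn hv
    obtain ⟨b1, bv1, hc1, hA1, hg1, hd1⟩ := hv_cand_spec arr n j v (2*j+1) hv (by omega) hn
    obtain ⟨b2, bv2, hc2, hA2, hg2, hd2⟩ := hv_cand_spec arr n b1 bv1 (2*j+2) hg1 (by omega) hn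
    by_cases hbj : b2 = j
    · refine ⟨[], ?_, ?_⟩
      · rw [hvPath]; simp [hc1, hc2, hbj]
      · rw [heapifyGoA]; simp [hA1, hA2, hbj, hvStates]
    · have hb2n : b2 < n := by rcases hd2 with h | ⟨h, h'⟩ <;> rcases hd1 with g | ⟨g, g'⟩ <;> omega
      have hb2pos : j < b2 := by rcases hd2 with h | ⟨h, h'⟩ <;> rcases hd1 with g | ⟨g, g'⟩ <;> omega
      have hjlen : j < (arr.length : Int) := by
        by_contra hcon
        rw [PySem.List.pyGet?_of_nonneg arr hj, List.getElem?_eq_none (by omega)] at hv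
        simp at hv
      have hs1 := hv_pySet_some arr j bv2 hj hjlen
      set arr1 := arr.set j.toNat bv2 with harr1
      have hlen1 : (arr1.length : Int) = (arr.length : Int) := by simp [harr1]
      have hs2 := hv_pySet_some arr1 b2 v (by omega) (by omega)
      set arr2 := arr1.set b2.toNat v with harr2
      have hlen2 : (arr2.length : Int) = (arr.length : Int) := by simp [harr2, harr1]
      have hv2 : PySem.List.pyGet? arr2 b2 = some v := by
        rw [PySem.List.pyGet?_of_nonneg arr2 (by omega)]
        rw [harr2, List.getElem?_set_self (by simp [harr1]; omega)]
      obtain ⟨p, hp, he⟩ := ih arr2 n b2 v (by omega) (by omega) hv2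
      have hpp : hvPath f arr n v b2 = some p := by
        rw [hv_path_congr f arr arr2 n v b2 (by omega) ?_, hp]
        intro c hc
        rw [PySem.List.pyGet?_of_nonneg arr (by omega : (0:Int) ≤ c),
            PySem.List.pyGet?_of_nonneg arr2 (by omega : (0:Int) ≤ c)]
        rw [harr2, harr1, List.getElem?_set_ne (by omega), List.getElem?_set_ne (by omega)]
      refine ⟨b2 :: p, ?_, ?_⟩
      · rw [hvPath]; simp [hc1, hc2, hbj, hpp]
      · rw [heapifyGoA]
        simp only [hA1, hA2, if_neg hbj, hv, hg2, hs1, hs2]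
        rw [hvStates]
        simp only [hv, hg2, hs1, hs2, he]

-- ===== VERDICT (by name: the statement is the Claim_ definition above) =====
theorem heapify_visual_spec : Claim_equal_heapify_visual := by
  intro arr n i _ hpre
  obtain ⟨hi, hpre2⟩ := hpre
  unfold Spec_heapify_visual heapify_visual heapify_visual_alt
  by_cases h : n ≤ 2*i+1
  · have h1 : ¬ (2*i+1 < n) := by omega
    have h2 : ¬ (2*i+2 < n) := by omega
    obtain ⟨f, hf⟩ : ∃ f, arr.length + n.natAbs + i.natAbs + 2 = f + 1 := ⟨_ + 1, rfl⟩
    rw [hf, heapifyGoA]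
    simp [hvCheckA, h1, h2, h]
  · have hn : n ≤ (arr.length : Int) := by rcases hpre2 with g | g <;> omega
    have hilen : i < (arr.length : Int) := by omega
    have hv := hv_pyGet_some arr i hi hilen
    obtain ⟨p, hp, he⟩ := hv_main (arr.length + n.natAbs + i.natAbs + 2) arr n i _ hi hn hv
    rw [he, if_neg h, hv]
    simp [hp]
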